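-- pv_equiv track=rewrite | github.com/raashis/ubs-r | routes/surveillance.py | would_create_cycle
-- ===== SOURCE A (Python) =====
-- from collections import defaultdict, Counter, deque
--
-- def would_create_cycle(keep_adj, u, v):
--     """
--     Returns True if adding u->v creates a cycle in the kept graph.
--     BFS from v to see if we can reach u.
--     """
--     if u == v:
--         return True
--     q = deque([v])
--     seen = {v}
--     while q:
--         x = q.popleft()
--         for nxt in keep_adj.get(x, []):
--             if nxt == u:
--                 return True
--             if nxt not in seen:
--                 seen.add(nxt)
--                 q.append(nxt)
--     return False
-- ===== SOURCE B (Python) =====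
-- def would_create_cycle(keep_adj, u, v):
--     """Fixpoint saturation: repeatedly sweep the whole adjacency mapping,
--     adding the neighbors of every already-reachable key, until a complete
--     sweep adds nothing; then answer with one membership test."""
--     if u == v:
--         return True
--     reach = {v}
--     changed = True
--     while changed:
--         changed = False
--         for a in keep_adj:
--             if a in reach:
--                 for b in keep_adj[a]:
--                     if b not in reach:
--                         reach.add(b)
--                         changed = True
--     return u in reach
-- ===== Notes on version B (the rewrite author's own statement) =====
-- stated objective: alternative
-- what changed: Replaces the early-exit BFS (FIFO queue + visited set + neighbor==u test inside the loop) by a worklist-free fixpoint saturation: repeated full sweeps over the adjacency mapping that add the neighbors of every already-reachable key until a whole sweep adds nothing, followed by a single membership test 'u in reach'.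
import Mathlib
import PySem

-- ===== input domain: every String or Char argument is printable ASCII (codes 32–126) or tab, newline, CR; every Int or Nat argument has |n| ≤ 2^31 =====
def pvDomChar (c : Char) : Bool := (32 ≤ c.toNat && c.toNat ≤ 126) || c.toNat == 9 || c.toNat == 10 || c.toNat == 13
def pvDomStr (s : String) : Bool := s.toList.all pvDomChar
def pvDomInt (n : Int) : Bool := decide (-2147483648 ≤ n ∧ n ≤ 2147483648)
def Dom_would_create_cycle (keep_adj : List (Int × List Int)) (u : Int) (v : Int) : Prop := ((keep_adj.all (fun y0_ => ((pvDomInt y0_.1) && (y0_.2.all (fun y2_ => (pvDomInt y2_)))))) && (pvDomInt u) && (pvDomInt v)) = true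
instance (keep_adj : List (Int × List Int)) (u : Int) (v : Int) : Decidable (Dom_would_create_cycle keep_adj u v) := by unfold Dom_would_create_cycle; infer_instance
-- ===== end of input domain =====

-- B replaces A's early-exit BFS (FIFO queue + visited set + neighbor==u test inside the loop) by a
-- worklist-free fixpoint saturation: repeated full sweeps over the adjacency mapping that add the
-- neighbors of every already-reachable key until one sweep adds nothing, then a single membership
-- test (objective: alternative algorithm for the same task; not claimed faster).

-- Shared helper: keep_adj.get(x, []) in A / keep_adj[a] in B — the same dict lookup.
def pvAdj (keep_adj : List (Int × List Int)) (x : Int) : List Int :=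
  PySem.Dict.getD (PySem.Dict.mk keep_adj) x []

-- Termination helpers (proof machinery for the well-founded recursion of both ports;
-- they are not part of either algorithm's computation).
def pvMeas (univ seen : List Int) : Nat := (univ.filter (fun z => decide (z ∉ seen))).length

theorem pvFilterLen_mono {p q : Int → Bool} (univ : List Int) (h : ∀ z, p z = true → q z = true) :
    (univ.filter p).length ≤ (univ.filter q).length := by
  induction univ with
  | nil => simp
  | cons a t ih =>
      simp only [List.filter_cons]
      by_cases hp : p a = true
      · rw [if_pos hp, if_pos (h a hp)]
        simpa using ih
      · rw [if_neg hp]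
        split
        · exact le_trans ih (by simp)
        · exact ih

theorem pvFilterLen_lt {p q : Int → Bool} (univ : List Int) (h : ∀ z, p z = true → q z = true)
    (a : Int) (ha : a ∈ univ) (hqa : q a = true) (hpa : p a = false) :
    (univ.filter p).length < (univ.filter q).length := by
  induction univ with
  | nil => simp at ha
  | cons b t ih =>
      rcases List.mem_cons.mp ha with rfl | hat
      · simp only [List.filter_cons]
        rw [if_neg (by simp [hpa]), if_pos hqa]
        exact Nat.lt_succ_of_le (pvFilterLen_mono t h)
      · have ihh := ih hat
        simp only [List.filter_cons]
        by_cases hpb : p b = true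
        · rw [if_pos hpb, if_pos (h b hpb)]
          simpa using ihh
        · rw [if_neg hpb]
          split
          · exact lt_of_lt_of_le ihh (by simp)
          · exact ihh

theorem pvMeas_lt (univ : List Int) {s s' : List Int} (h : ∀ z ∈ s, z ∈ s')
    (a : Int) (ha : a ∈ univ) (has' : a ∈ s') (has : a ∉ s) :
    pvMeas univ s' < pvMeas univ s := by
  apply pvFilterLen_lt _ _ a ha
  · simp [has]
  · simp [has']
  · intro z hz
    simp only [decide_eq_true_eq] at *
    exact fun hm => hz (h z hm)

theorem pvAdj_cons (p : Int × List Int) (rest : List (Int × List Int)) (x : Int) :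
    pvAdj (p :: rest) x = if p.1 = x then p.2 else pvAdj rest x := by
  obtain ⟨k, l⟩ := p
  simp only [pvAdj, PySem.Dict.getD_eq_get?_getD, PySem.Dict.get?_mk_cons]
  by_cases h : k = x <;> simp [h]

theorem pvAdj_subset (keep_adj : List (Int × List Int)) (x : Int) :
    ∀ n ∈ pvAdj keep_adj x, n ∈ keep_adj.flatMap (fun p => p.2) := by
  induction keep_adj with
  | nil => intro n hn; simp [pvAdj, PySem.Dict.getD_eq_get?_getD, PySem.Dict.get?] at hn
  | cons p rest ih =>
      intro n hn
      rw [pvAdj_cons] at hn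
      simp only [List.flatMap_cons, List.mem_append]
      by_cases h : p.1 = x
      · simp [h] at hn; exact Or.inl hn
      · simp [h] at hn; exact Or.inr (ih n hn)

-- ===== PORT A =====
-- inner 'for nxt in keep_adj.get(x, [])' loop of A: returns (early-return-True?, seen, q)
def scanA (u : Int) : List Int → PySem.Set Int → List Int → Bool × PySem.Set Int × List Int
  | [], seen, q => (false, seen, q)
  | n :: ns, seen, q =>
    if n = u then (true, seen, q)
    else if n ∉ seen then scanA u ns (PySem.Set.add seen n) (q ++ [n])
    else scanA u ns seen q

theorem scanA_decrease (u : Int) (univ : List Int) :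
    ∀ (ns : List Int) (seen : PySem.Set Int) (q : List Int), (∀ n ∈ ns, n ∈ univ) →
    ((scanA u ns seen q).2.1 = seen ∧ (scanA u ns seen q).2.2 = q) ∨
      pvMeas univ (scanA u ns seen q).2.1 < pvMeas univ seen := by
  intro ns
  induction ns with
  | nil => intro seen q _; exact Or.inl ⟨rfl, rfl⟩
  | cons n ns ih =>
      intro seen q hsub
      simp only [scanA]
      split
      · exact Or.inl ⟨rfl, rfl⟩
      · split
        · rename_i hu hn
          right
          have hadd : PySem.Set.add seen n = seen ++ [n] := PySem.Set.add_of_not_mem hn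
          have hlt : pvMeas univ (PySem.Set.add seen n) < pvMeas univ seen := by
            rw [hadd]
            exact pvMeas_lt univ (fun z hz => List.mem_append_left _ hz)
              n (hsub n (List.mem_cons_self ..)) (List.mem_append_right _ (List.mem_singleton.mpr rfl)) hn
          rcases ih (PySem.Set.add seen n) (q ++ [n]) (fun m hm => hsub m (List.mem_cons_of_mem _ hm)) with ⟨hs, _⟩ | h
          · rw [hs]; exact hlt
          · exact lt_trans h hlt
        · exact ih seen q (fun m hm => hsub m (List.mem_cons_of_mem _ hm))

-- A's BFS 'while q:' loop
def bfsA (keep_adj : List (Int × List Int)) (u : Int) (q : List Int) (seen : PySem.Set Int) : Bool :=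
  match q with
  | [] => false
  | x :: q' =>
    let r := scanA u (pvAdj keep_adj x) seen q'
    if r.1 then true
    else bfsA keep_adj u r.2.2 r.2.1
termination_by (pvMeas (keep_adj.flatMap (fun p => p.2)) seen, q.length)
decreasing_by
  rcases scanA_decrease u (keep_adj.flatMap (fun p => p.2)) (pvAdj keep_adj x) seen q'
      (pvAdj_subset keep_adj x) with ⟨hs, hq⟩ | h
  · rw [hs, hq]; exact Prod.Lex.right _ (by simp)
  · exact Prod.Lex.left _ _ h

def would_create_cycle (keep_adj : List (Int × List Int)) (u : Int) (v : Int) : Bool :=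
  if u = v then true
  else bfsA keep_adj u [v] (PySem.Set.ofList [v])

-- ===== PORT B =====
-- inner 'for b in keep_adj[a]:' loop of B: returns (reach, changed)
def addNbrs : List Int → PySem.Set Int → Bool → PySem.Set Int × Bool
  | [], reach, ch => (reach, ch)
  | b :: bs, reach, ch =>
    if b ∉ reach then addNbrs bs (PySem.Set.add reach b) true
    else addNbrs bs reach ch

-- B's 'for a in keep_adj:' sweep over the dict's keys
def sweepB (keep_adj : List (Int × List Int)) : List Int → PySem.Set Int → Bool → PySem.Set Int × Bool
  | [], reach, ch => (reach, ch)
  | a :: ks, reach, ch =>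
    if a ∈ reach then
      let r := addNbrs (pvAdj keep_adj a) reach ch
      sweepB keep_adj ks r.1 r.2
    else sweepB keep_adj ks reach ch

theorem addNbrs_decrease (univ : List Int) :
    ∀ (bs : List Int) (reach : PySem.Set Int) (ch : Bool), (∀ n ∈ bs, n ∈ univ) →
    ((addNbrs bs reach ch).1 = reach ∧ (addNbrs bs reach ch).2 = ch) ∨
      pvMeas univ (addNbrs bs reach ch).1 < pvMeas univ reach := by
  intro bs
  induction bs with
  | nil => intro reach ch _; exact Or.inl ⟨rfl, rfl⟩
  | cons b bs ih =>
      intro reach ch hsub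
      simp only [addNbrs]
      split
      · rename_i hb
        right
        have hadd : PySem.Set.add reach b = reach ++ [b] := PySem.Set.add_of_not_mem hb
        have hlt : pvMeas univ (PySem.Set.add reach b) < pvMeas univ reach := by
          rw [hadd]
          exact pvMeas_lt univ (fun z hz => List.mem_append_left _ hz)
            b (hsub b (List.mem_cons_self ..)) (List.mem_append_right _ (List.mem_singleton.mpr rfl)) hb
        rcases ih (PySem.Set.add reach b) true (fun m hm => hsub m (List.mem_cons_of_mem _ hm)) with ⟨hs, _⟩ | h
        · rw [hs]; exact hlt
        · exact lt_trans h hlt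
      · exact ih reach ch (fun m hm => hsub m (List.mem_cons_of_mem _ hm))

theorem sweepB_decrease (keep_adj : List (Int × List Int)) :
    ∀ (ks : List Int) (reach : PySem.Set Int) (ch : Bool),
    ((sweepB keep_adj ks reach ch).1 = reach ∧ (sweepB keep_adj ks reach ch).2 = ch) ∨
      pvMeas (keep_adj.flatMap (fun p => p.2)) (sweepB keep_adj ks reach ch).1 <
        pvMeas (keep_adj.flatMap (fun p => p.2)) reach := by
  intro ks
  induction ks with
  | nil => intro reach ch; exact Or.inl ⟨rfl, rfl⟩
  | cons a ks ih =>
      intro reach ch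
      simp only [sweepB]
      split
      · rcases addNbrs_decrease (keep_adj.flatMap (fun p => p.2)) (pvAdj keep_adj a) reach ch
            (pvAdj_subset keep_adj a) with ⟨h1, h2⟩ | h
        · rw [h1, h2]
          exact ih reach ch
        · rcases ih (addNbrs (pvAdj keep_adj a) reach ch).1 (addNbrs (pvAdj keep_adj a) reach ch).2 with ⟨hs, _⟩ | h2
          · rw [hs]; exact Or.inr h
          · exact Or.inr (lt_trans h2 h)
      · exact ih reach ch

-- B's 'while changed:' outer loop
def saturB (keep_adj : List (Int × List Int)) (reach : PySem.Set Int) : PySem.Set Int :=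
  let res := sweepB keep_adj ((PySem.Dict.mk keep_adj).keys) reach false
  if res.2 then saturB keep_adj res.1 else res.1
termination_by pvMeas (keep_adj.flatMap (fun p => p.2)) reach
decreasing_by
  rename_i hres
  rcases sweepB_decrease keep_adj ((PySem.Dict.mk keep_adj).keys) reach false with ⟨_, h2⟩ | h
  · rw [h2] at hres; exact absurd hres (by simp)
  · exact h

def would_create_cycle_alt (keep_adj : List (Int × List Int)) (u : Int) (v : Int) : Bool :=
  if u = v then true
  else PySem.Set.contains (saturB keep_adj (PySem.Set.ofList [v])) u

-- ===== PRECONDITION & SPEC =====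
def Spec_would_create_cycle (keep_adj : List (Int × List Int)) (u : Int) (v : Int) (out : Bool) : Prop := out = would_create_cycle_alt keep_adj u v
instance (keep_adj : List (Int × List Int)) (u : Int) (v : Int) (out : Bool) : Decidable (Spec_would_create_cycle keep_adj u v out) := by unfold Spec_would_create_cycle; infer_instance

-- ===== CLAIM (what is proved, stated in full; the proofs are below) =====
def Claim_equal_would_create_cycle : Prop := ∀ (keep_adj : List (Int × List Int)) (u : Int) (v : Int), Dom_would_create_cycle keep_adj u v → Spec_would_create_cycle keep_adj u v (would_create_cycle keep_adj u v)

-- ===== LEMMAS AND PROOFS =====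

-- edge relation of the kept graph: pvE a b ↔ b is a neighbour of a
def pvE (keep_adj : List (Int × List Int)) (a b : Int) : Prop := b ∈ pvAdj keep_adj a

theorem scanA_found (u : Int) :
    ∀ (ns : List Int) (seen : PySem.Set Int) (q : List Int),
      (scanA u ns seen q).1 = true ↔ u ∈ ns := by
  intro ns
  induction ns with
  | nil => intro seen q; simp [scanA]
  | cons n ns ih =>
      intro seen q
      simp only [scanA]
      by_cases h1 : n = u
      · simp [h1]
      · rw [if_neg h1]
        split <;> rw [ih] <;> simp only [List.mem_cons] <;> exact ⟨fun h => Or.inr h, fun h => h.elim (fun (h : u = n) => absurd h.symm h1) id⟩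

theorem scanA_mem (u : Int) :
    ∀ (ns : List Int) (seen : PySem.Set Int) (q : List Int), u ∉ ns →
      (∀ z, (z ∈ (scanA u ns seen q).2.1 ↔ z ∈ seen ∨ z ∈ ns)) ∧
      (∀ z, (z ∈ (scanA u ns seen q).2.2 ↔ z ∈ q ∨ (z ∈ ns ∧ z ∉ seen))) := by
  intro ns
  induction ns with
  | nil => intro seen q _; simp [scanA]
  | cons n ns ih =>
      intro seen q hu
      have h1 : ¬ n = u := fun h => hu (h ▸ List.mem_cons_self ..)
      have hu' : u ∉ ns := fun h => hu (List.mem_cons_of_mem _ h)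
      simp only [scanA]
      rw [if_neg h1]
      split
      · rename_i hn
        obtain ⟨ihs, ihq⟩ := ih (PySem.Set.add seen n) (q ++ [n]) hu'
        constructor
        · intro z
          rw [ihs z, PySem.Set.mem_add]
          simp only [List.mem_cons]
          tauto
        · intro z
          rw [ihq z]
          simp only [List.mem_append, PySem.Set.mem_add, List.mem_cons]
          by_cases hz : z = n
          · subst hz; tauto
          · tauto
      · rename_i hn
        rw [not_not] at hn
        obtain ⟨ihs, ihq⟩ := ih seen q hu'
        constructor
        · intro z
          rw [ihs z]
          simp only [List.mem_cons]
          by_cases hz : z = n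
          · subst hz; tauto
          · tauto
        · intro z
          rw [ihq z]
          simp only [List.mem_cons]
          by_cases hz : z = n
          · subst hz; tauto
          · tauto

theorem escapeA (keep_adj : List (Int × List Int)) (u : Int) (q : List Int) (seen : PySem.Set Int)
    (hseen : ∀ y ∈ seen, y ∈ q ∨ (u ∉ pvAdj keep_adj y ∧ ∀ z ∈ pvAdj keep_adj y, z ∈ seen))
    (t : Int) (hu : u ∈ pvAdj keep_adj t) :
    ∀ z, Relation.ReflTransGen (pvE keep_adj) z t → z ∈ seen →
      ∃ s ∈ q, Relation.ReflTransGen (pvE keep_adj) s t := by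
  intro z hzt
  induction hzt using Relation.ReflTransGen.head_induction_on with
  | refl =>
      intro ht
      rcases hseen t ht with h | ⟨hnu, _⟩
      · exact ⟨t, h, Relation.ReflTransGen.refl⟩
      · exact absurd hu hnu
  | head hab hbt ih =>
      rename_i a b
      intro ha
      rcases hseen a ha with h | ⟨_, hcl⟩
      · exact ⟨a, h, Relation.ReflTransGen.head hab hbt⟩
      · exact ih (hcl _ hab)

theorem bfsA_iff (keep_adj : List (Int × List Int)) (u : Int) :
    ∀ (q : List Int) (seen : PySem.Set Int),
      (∀ y ∈ seen, y ∈ q ∨ (u ∉ pvAdj keep_adj y ∧ ∀ z ∈ pvAdj keep_adj y, z ∈ seen)) →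
      (∀ x ∈ q, x ∈ seen) →
      (bfsA keep_adj u q seen = true ↔
        ∃ x, (∃ s ∈ q, Relation.ReflTransGen (pvE keep_adj) s x) ∧ u ∈ pvAdj keep_adj x) := by
  intro q seen
  induction q, seen using bfsA.induct keep_adj u with
  | case1 seen =>
      intro _ _
      simp [bfsA]
  | case2 seen x q' r hr =>
      intro _ _
      have hr' : (scanA u (pvAdj keep_adj x) seen q').1 = true := hr
      have hu : u ∈ pvAdj keep_adj x := (scanA_found u _ seen q').mp hr'
      have hbfs : bfsA keep_adj u (x :: q') seen = true := by
        rw [bfsA]; simp only [hr', if_true]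
      rw [hbfs]
      simp only [true_iff]
      exact ⟨x, ⟨x, List.mem_cons_self .., Relation.ReflTransGen.refl⟩, hu⟩
  | case3 seen x q' r hr ih =>
      intro hseen hq
      have hr' : ¬ (scanA u (pvAdj keep_adj x) seen q').1 = true := hr
      have hu : u ∉ pvAdj keep_adj x := fun h => hr' ((scanA_found u _ seen q').mpr h)
      obtain ⟨hms, hmq⟩ := scanA_mem u (pvAdj keep_adj x) seen q' hu
      have hbfs : bfsA keep_adj u (x :: q') seen =
          bfsA keep_adj u (scanA u (pvAdj keep_adj x) seen q').2.2 (scanA u (pvAdj keep_adj x) seen q').2.1 := by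
        rw [bfsA]; simp only [if_neg hr']
      -- invariants for the new state
      have hq' : ∀ z ∈ (scanA u (pvAdj keep_adj x) seen q').2.2, z ∈ (scanA u (pvAdj keep_adj x) seen q').2.1 := by
        intro z hz
        rcases (hmq z).mp hz with h | ⟨h, _⟩
        · exact (hms z).mpr (Or.inl (hq z (List.mem_cons_of_mem _ h)))
        · exact (hms z).mpr (Or.inr h)
      have hseen' : ∀ y ∈ (scanA u (pvAdj keep_adj x) seen q').2.1,
          y ∈ (scanA u (pvAdj keep_adj x) seen q').2.2 ∨
            (u ∉ pvAdj keep_adj y ∧ ∀ z ∈ pvAdj keep_adj y, z ∈ (scanA u (pvAdj keep_adj x) seen q').2.1) := by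
        intro y hy
        by_cases hyx : y = x
        · subst hyx
          exact Or.inr ⟨hu, fun z hz => (hms z).mpr (Or.inr hz)⟩
        · rcases (hms y).mp hy with hys | hyn
          · rcases hseen y hys with hyq | ⟨hnu, hcl⟩
            · rcases List.mem_cons.mp hyq with h | h
              · exact absurd h hyx
              · exact Or.inl ((hmq y).mpr (Or.inl h))
            · exact Or.inr ⟨hnu, fun z hz => (hms z).mpr (Or.inl (hcl z hz))⟩
          · by_cases hysn : y ∈ seen
            · rcases hseen y hysn with hyq | ⟨hnu, hcl⟩
              · rcases List.mem_cons.mp hyq with h | h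
                · exact absurd h hyx
                · exact Or.inl ((hmq y).mpr (Or.inl h))
              · exact Or.inr ⟨hnu, fun z hz => (hms z).mpr (Or.inl (hcl z hz))⟩
            · exact Or.inl ((hmq y).mpr (Or.inr ⟨hyn, hysn⟩))
      rw [hbfs, ih hseen' hq']
      constructor
      · rintro ⟨x', ⟨s, hs, hpath⟩, hux'⟩
        rcases (hmq s).mp hs with h | ⟨hsn, _⟩
        · exact ⟨x', ⟨s, List.mem_cons_of_mem _ h, hpath⟩, hux'⟩
        · exact ⟨x', ⟨x, List.mem_cons_self .., Relation.ReflTransGen.head hsn hpath⟩, hux'⟩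
      · rintro ⟨x', ⟨s, hs, hpath⟩, hux'⟩
        rcases List.mem_cons.mp hs with hsx | hsq
        · subst hsx
          rcases Relation.ReflTransGen.cases_head hpath with rfl | ⟨c, hxc, hcx'⟩
          · exact absurd hux' hu
          · have hc : c ∈ (scanA u (pvAdj keep_adj s) seen q').2.1 := (hms c).mpr (Or.inr hxc)
            exact ⟨x', escapeA keep_adj u _ _ hseen' x' hux' c hcx' hc, hux'⟩
        · exact ⟨x', ⟨s, (hmq s).mpr (Or.inl hsq), hpath⟩, hux'⟩

theorem pvA_iff (keep_adj : List (Int × List Int)) (u v : Int) (hne : u ≠ v) :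
    (would_create_cycle keep_adj u v = true ↔
      ∃ x, Relation.ReflTransGen (pvE keep_adj) v x ∧ u ∈ pvAdj keep_adj x) := by
  unfold would_create_cycle
  rw [if_neg hne]
  have hof : PySem.Set.ofList [v] = [v] := rfl
  rw [hof]
  rw [bfsA_iff keep_adj u [v] [v]
    (fun y hy => Or.inl hy) (fun x hx => hx)]
  constructor
  · rintro ⟨x, ⟨s, hs, hpath⟩, hux⟩
    rw [List.mem_singleton.mp hs] at hpath
    exact ⟨x, hpath, hux⟩
  · rintro ⟨x, hpath, hux⟩
    exact ⟨x, ⟨v, List.mem_singleton.mpr rfl, hpath⟩, hux⟩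

-- B-side lemmas
theorem addNbrs_mem :
    ∀ (bs : List Int) (reach : PySem.Set Int) (ch : Bool) (z : Int),
      z ∈ (addNbrs bs reach ch).1 ↔ z ∈ reach ∨ z ∈ bs := by
  intro bs
  induction bs with
  | nil => intro reach ch z; simp [addNbrs]
  | cons b bs ih =>
      intro reach ch z
      simp only [addNbrs]
      split
      · rw [ih]
        simp only [PySem.Set.mem_add, List.mem_cons]
        tauto
      · rw [ih]
        simp only [List.mem_cons]
        rename_i hb
        rw [not_not] at hb
        by_cases hz : z = b
        · subst hz; tauto
        · tauto

theorem addNbrs_ch_true :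
    ∀ (bs : List Int) (reach : PySem.Set Int), (addNbrs bs reach true).2 = true := by
  intro bs
  induction bs with
  | nil => intro reach; simp [addNbrs]
  | cons b bs ih =>
      intro reach
      simp only [addNbrs]
      split
      · exact ih _
      · exact ih _

theorem addNbrs_false :
    ∀ (bs : List Int) (reach : PySem.Set Int), (addNbrs bs reach false).2 = false →
      (addNbrs bs reach false).1 = reach ∧ ∀ b ∈ bs, b ∈ reach := by
  intro bs
  induction bs with
  | nil => intro reach _; exact ⟨rfl, by simp⟩
  | cons b bs ih =>
      intro reach h
      simp only [addNbrs] at h ⊢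
      split at h
      · rw [addNbrs_ch_true] at h
        exact absurd h (by simp)
      · rename_i hb
        rw [not_not] at hb
        obtain ⟨h1, h2⟩ := ih reach h
        rw [if_neg (by simpa using hb)]
        refine ⟨h1, ?_⟩
        intro c hc
        rcases List.mem_cons.mp hc with rfl | hc'
        · exact hb
        · exact h2 c hc'

theorem sweepB_ch_true (keep_adj : List (Int × List Int)) :
    ∀ (ks : List Int) (reach : PySem.Set Int), (sweepB keep_adj ks reach true).2 = true := by
  intro ks
  induction ks with
  | nil => intro reach; simp [sweepB]
  | cons a ks ih =>
      intro reach
      simp only [sweepB]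
      split
      · rw [addNbrs_ch_true]
        exact ih _
      · exact ih _

theorem sweepB_sub (keep_adj : List (Int × List Int)) :
    ∀ (ks : List Int) (reach : PySem.Set Int) (ch : Bool) (z : Int),
      z ∈ reach → z ∈ (sweepB keep_adj ks reach ch).1 := by
  intro ks
  induction ks with
  | nil => intro reach ch z hz; exact hz
  | cons a ks ih =>
      intro reach ch z hz
      simp only [sweepB]
      split
      · exact ih _ _ z ((addNbrs_mem _ _ _ z).mpr (Or.inl hz))
      · exact ih _ _ z hz

theorem sweepB_false (keep_adj : List (Int × List Int)) :
    ∀ (ks : List Int) (reach : PySem.Set Int), (sweepB keep_adj ks reach false).2 = false →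
      (sweepB keep_adj ks reach false).1 = reach ∧
        ∀ a ∈ ks, a ∈ reach → ∀ b ∈ pvAdj keep_adj a, b ∈ reach := by
  intro ks
  induction ks with
  | nil => intro reach _; exact ⟨rfl, by simp⟩
  | cons a ks ih =>
      intro reach h
      simp only [sweepB] at h ⊢
      split at h <;> rename_i ha
      · have hch : (addNbrs (pvAdj keep_adj a) reach false).2 = false := by
          by_contra hx
          rw [Bool.not_eq_false] at hx
          rw [hx, sweepB_ch_true] at h
          exact absurd h (by simp)
        obtain ⟨he, hb⟩ := addNbrs_false _ _ hch
        rw [he, hch] at h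
        obtain ⟨h1, h2⟩ := ih reach h
        rw [if_pos ha, he, hch]
        refine ⟨h1, ?_⟩
        intro c hc hcr
        rcases List.mem_cons.mp hc with rfl | hc'
        · exact hb
        · exact h2 c hc' hcr
      · obtain ⟨h1, h2⟩ := ih reach h
        rw [if_neg ha]
        refine ⟨h1, ?_⟩
        intro c hc hcr
        rcases List.mem_cons.mp hc with rfl | hc'
        · exact absurd hcr ha
        · exact h2 c hc' hcr

theorem sweepB_sound (keep_adj : List (Int × List Int)) (C : Int → Prop)
    (hC : ∀ a, C a → ∀ b ∈ pvAdj keep_adj a, C b) :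
    ∀ (ks : List Int) (reach : PySem.Set Int) (ch : Bool),
      (∀ z ∈ reach, C z) → ∀ z ∈ (sweepB keep_adj ks reach ch).1, C z := by
  intro ks
  induction ks with
  | nil => intro reach ch hr z hz; exact hr z hz
  | cons a ks ih =>
      intro reach ch hr z hz
      simp only [sweepB] at hz
      split at hz <;> rename_i ha
      · refine ih _ _ ?_ z hz
        intro w hw
        rcases (addNbrs_mem _ _ _ w).mp hw with h | h
        · exact hr w h
        · exact hC a (hr a ha) w h
      · exact ih _ _ hr z hz

theorem pvAdj_not_key (keep_adj : List (Int × List Int)) (x : Int)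
    (hx : x ∉ keep_adj.map (·.1)) : pvAdj keep_adj x = [] := by
  induction keep_adj with
  | nil => rfl
  | cons p rest ih =>
      rw [pvAdj_cons]
      simp only [List.map_cons, List.mem_cons, not_or] at hx
      rw [if_neg (fun h => hx.1 h.symm)]
      exact ih hx.2

theorem keysB_eq (keep_adj : List (Int × List Int)) :
    (PySem.Dict.mk keep_adj).keys = keep_adj.map (·.1) := rfl

theorem saturB_eq (keep_adj : List (Int × List Int)) (reach : PySem.Set Int) :
    saturB keep_adj reach =
      if (sweepB keep_adj ((PySem.Dict.mk keep_adj).keys) reach false).2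
      then saturB keep_adj (sweepB keep_adj ((PySem.Dict.mk keep_adj).keys) reach false).1
      else (sweepB keep_adj ((PySem.Dict.mk keep_adj).keys) reach false).1 := by
  conv_lhs => rw [saturB]

theorem saturB_sub (keep_adj : List (Int × List Int)) :
    ∀ (reach : PySem.Set Int) (z : Int), z ∈ reach → z ∈ saturB keep_adj reach := by
  intro reach
  induction reach using saturB.induct keep_adj with
  | case1 reach res hres0 ih =>
      have hres : (sweepB keep_adj ((PySem.Dict.mk keep_adj).keys) reach false).2 = true := hres0
      intro z hz
      rw [saturB_eq, if_pos hres]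
      exact ih z (sweepB_sub keep_adj _ reach false z hz)
  | case2 reach res hres0 =>
      have hres : ¬ (sweepB keep_adj ((PySem.Dict.mk keep_adj).keys) reach false).2 = true := hres0
      intro z hz
      rw [saturB_eq, if_neg hres]
      exact sweepB_sub keep_adj _ reach false z hz

theorem saturB_closed (keep_adj : List (Int × List Int)) :
    ∀ (reach : PySem.Set Int) (a b : Int), a ∈ saturB keep_adj reach →
      b ∈ pvAdj keep_adj a → b ∈ saturB keep_adj reach := by
  intro reach
  induction reach using saturB.induct keep_adj with
  | case1 reach res hres0 ih =>
      have hres : (sweepB keep_adj ((PySem.Dict.mk keep_adj).keys) reach false).2 = true := hres0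
      intro a b ha hb
      rw [saturB_eq, if_pos hres] at ha ⊢
      exact ih a b ha hb
  | case2 reach res hres0 =>
      have hres : ¬ (sweepB keep_adj ((PySem.Dict.mk keep_adj).keys) reach false).2 = true := hres0
      intro a b ha hb
      rw [saturB_eq, if_neg hres] at ha ⊢
      -- fixpoint reached: the sweep changed nothing, so the result is closed under edges
      have hfix := sweepB_false keep_adj ((PySem.Dict.mk keep_adj).keys) reach
        (Bool.eq_false_iff.mpr (fun hx => hres hx))
      rw [hfix.1] at ha ⊢
      by_cases hk : a ∈ keep_adj.map (·.1)
      · exact hfix.2 a (keysB_eq keep_adj ▸ hk) ha b hb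
      · rw [pvAdj_not_key keep_adj a hk] at hb
        simp at hb

theorem saturB_sound (keep_adj : List (Int × List Int)) (C : Int → Prop)
    (hC : ∀ a, C a → ∀ b ∈ pvAdj keep_adj a, C b) :
    ∀ (reach : PySem.Set Int), (∀ z ∈ reach, C z) → ∀ z ∈ saturB keep_adj reach, C z := by
  intro reach
  induction reach using saturB.induct keep_adj with
  | case1 reach res hres0 ih =>
      have hres : (sweepB keep_adj ((PySem.Dict.mk keep_adj).keys) reach false).2 = true := hres0
      intro hr z hz
      rw [saturB_eq, if_pos hres] at hz
      exact ih (fun w hw => sweepB_sound keep_adj C hC _ reach false hr w hw) z hz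
  | case2 reach res hres0 =>
      have hres : ¬ (sweepB keep_adj ((PySem.Dict.mk keep_adj).keys) reach false).2 = true := hres0
      intro hr z hz
      rw [saturB_eq, if_neg hres] at hz
      exact sweepB_sound keep_adj C hC _ reach false hr z hz

theorem pvB_iff (keep_adj : List (Int × List Int)) (u v : Int) (hne : u ≠ v) :
    (would_create_cycle_alt keep_adj u v = true ↔
      Relation.ReflTransGen (pvE keep_adj) v u) := by
  unfold would_create_cycle_alt
  rw [if_neg hne]
  have hof : PySem.Set.ofList [v] = [v] := rfl
  rw [hof, PySem.Set.contains_iff]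
  constructor
  · intro hu
    exact saturB_sound keep_adj (Relation.ReflTransGen (pvE keep_adj) v)
      (fun a hCa b hb => Relation.ReflTransGen.tail hCa hb) [v]
      (fun z hz => by rw [List.mem_singleton.mp hz]) u hu
  · intro h
    clear hne
    induction h with
    | refl => exact saturB_sub keep_adj [v] v (List.mem_singleton.mpr rfl)
    | tail _ hbc ih => exact saturB_closed keep_adj [v] _ _ ih hbc

theorem pvBridge (keep_adj : List (Int × List Int)) (u v : Int) (hne : u ≠ v) :
    ((∃ x, Relation.ReflTransGen (pvE keep_adj) v x ∧ u ∈ pvAdj keep_adj x) ↔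
      Relation.ReflTransGen (pvE keep_adj) v u) := by
  constructor
  · rintro ⟨x, hpath, hux⟩
    exact Relation.ReflTransGen.tail hpath hux
  · intro h
    rcases Relation.ReflTransGen.cases_tail h with rfl | ⟨c, hvc, hcu⟩
    · exact absurd rfl hne
    · exact ⟨c, hvc, hcu⟩

-- ===== VERDICT (by name: the statement is the Claim_ definition above) =====
theorem would_create_cycle_spec : Claim_equal_would_create_cycle := by
  unfold Claim_equal_would_create_cycle
  intro keep_adj u v _
  unfold Spec_would_create_cycle
  by_cases huv : u = v
  · simp [would_create_cycle, would_create_cycle_alt, huv]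
  · rw [Bool.eq_iff_iff, pvA_iff keep_adj u v huv, pvB_iff keep_adj u v huv]
    exact pvBridge keep_adj u v huv
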